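-- pv_equiv track=rewrite | github.com/elifert/CS50P-Final-Project | project.py | return_crop
-- ===== SOURCE A (Python) =====
-- def return_crop(climate):
--     data = []
--     climates = {
--         "wheat": ["cfa", "cfb", "csa", "csb", "dfa", "dfb", "dwa"],
--         "beet": ["cfa", "csa", "cfb", "csb", "cfc", "dfb"],
--         "corn": ["cfa", "cfb", "csa", "csb", "dfb", "dfa"],
--         "sunflower": ["cfa", "cfb", "csb", "dfa", "dfb", "bs"],
--         "barley": ["cfa", "cfb", "csa", "csb", "dfa", "dfb", "dwa", "bs"],
--     }
--
--     for crop in climates: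
--         for crop_climate in climates[crop]:
--             if crop_climate == climate:
--                 data.append(crop)
--     return data if data else None
-- ===== SOURCE B (Python) =====
-- _BY_CLIMATE = {
--     "cfa": ["wheat", "beet", "corn", "sunflower", "barley"],
--     "cfb": ["wheat", "beet", "corn", "sunflower", "barley"],
--     "csa": ["wheat", "beet", "corn", "barley"],
--     "csb": ["wheat", "beet", "corn", "sunflower", "barley"],
--     "cfc": ["beet"],
--     "dfa": ["wheat", "corn", "sunflower", "barley"],
--     "dfb": ["wheat", "beet", "corn", "sunflower", "barley"],
--     "dwa": ["wheat", "barley"],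
--     "bs": ["sunflower", "barley"],
-- }
--
-- def return_crop(climate):
--     return _BY_CLIMATE.get(climate)
-- ===== Notes on version B (the rewrite author's own statement) =====
-- stated objective: simpler
-- what changed: Replaces A's nested scan over every crop's climate list with a single lookup in a precomputed inverted table mapping each climate code to its crop list (crop order preserved); unknown codes return None via .get.
import Mathlib
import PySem

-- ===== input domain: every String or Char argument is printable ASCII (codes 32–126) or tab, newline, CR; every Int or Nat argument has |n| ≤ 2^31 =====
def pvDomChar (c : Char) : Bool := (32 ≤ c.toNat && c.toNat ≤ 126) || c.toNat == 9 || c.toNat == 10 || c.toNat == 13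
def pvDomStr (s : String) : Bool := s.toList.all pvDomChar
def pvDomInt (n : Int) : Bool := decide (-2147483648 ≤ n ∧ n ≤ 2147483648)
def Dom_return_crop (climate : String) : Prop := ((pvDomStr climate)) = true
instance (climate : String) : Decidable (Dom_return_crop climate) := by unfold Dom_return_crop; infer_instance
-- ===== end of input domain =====

-- B replaces the nested scan over every crop's climate list with one lookup in a precomputed inverted table (objective: simpler).


-- ===== PORT A =====
def return_crop (climate : String) : Option (List String) :=
  let climates : List (String × List String) :=
    [("wheat", ["cfa", "cfb", "csa", "csb", "dfa", "dfb", "dwa"]),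
     ("beet", ["cfa", "csa", "cfb", "csb", "cfc", "dfb"]),
     ("corn", ["cfa", "cfb", "csa", "csb", "dfb", "dfa"]),
     ("sunflower", ["cfa", "cfb", "csb", "dfa", "dfb", "bs"]),
     ("barley", ["cfa", "cfb", "csa", "csb", "dfa", "dfb", "dwa", "bs"])]
  let data : List String :=
    climates.foldl (fun acc p =>
      p.2.foldl (fun acc2 cc => if cc == climate then acc2 ++ [p.1] else acc2) acc) []
  if data = [] then none else some data

-- ===== PORT B =====
def byClimateTable : PySem.Dict String (List String) :=
  PySem.Dict.mk [("cfa", ["wheat", "beet", "corn", "sunflower", "barley"]),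
   ("cfb", ["wheat", "beet", "corn", "sunflower", "barley"]),
   ("csa", ["wheat", "beet", "corn", "barley"]),
   ("csb", ["wheat", "beet", "corn", "sunflower", "barley"]),
   ("cfc", ["beet"]),
   ("dfa", ["wheat", "corn", "sunflower", "barley"]),
   ("dfb", ["wheat", "beet", "corn", "sunflower", "barley"]),
   ("dwa", ["wheat", "barley"]),
   ("bs", ["sunflower", "barley"])]

def return_crop_alt (climate : String) : Option (List String) :=
  byClimateTable.get? climate

-- ===== PRECONDITION & SPEC =====
def Spec_return_crop (climate : String) (out : Option (List String)) : Prop := out = return_crop_alt climate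
instance (climate : String) (out : Option (List String)) : Decidable (Spec_return_crop climate out) := by unfold Spec_return_crop; infer_instance

-- ===== CLAIM (what is proved, stated in full; the proofs are below) =====
def Claim_equal_return_crop : Prop := ∀ (climate : String), Dom_return_crop climate → Spec_return_crop climate (return_crop climate)

-- ===== LEMMAS AND PROOFS =====

-- ===== VERDICT (by name: the statement is the Claim_ definition above) =====
theorem return_crop_spec : Claim_equal_return_crop := by
  intro climate _
  unfold Spec_return_crop return_crop return_crop_alt byClimateTable
  by_cases h1 : "cfa" = climate
  · subst h1; decide
  by_cases h2 : "cfb" = climate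
  · subst h2; decide
  by_cases h3 : "csa" = climate
  · subst h3; decide
  by_cases h4 : "csb" = climate
  · subst h4; decide
  by_cases h5 : "cfc" = climate
  · subst h5; decide
  by_cases h6 : "dfa" = climate
  · subst h6; decide
  by_cases h7 : "dfb" = climate
  · subst h7; decide
  by_cases h8 : "dwa" = climate
  · subst h8; decide
  by_cases h9 : "bs" = climate
  · subst h9; decide
  simp [PySem.Dict.get?,
        h1, h2, h3, h4, h5, h6, h7, h8, h9, beq_iff_eq]
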